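-- pv_equiv track=rewrite | github.com/SatakeAkiyoshi/RobotProgramming | webapp/segment.py | cldic
-- ===== SOURCE A (Python) =====
-- def cldic(ldic):
--     c = False
--     for l in ldic:
--         if ldic[l] in ldic:
--             ldic[l] = ldic[ldic[l]]
--             c = True
--
--     if c:
--         ldic = cldic(ldic)
--     return ldic
-- ===== SOURCE B (Python) =====
-- def cldic(ldic):
--     # Single memoized chain-resolution pass (assumes acyclic chains, as A does:
--     # A recurses forever on a cycle). Returns a new dict; A mutates in place.
--     memo = {}
--     out = {}
--     for k, v in ldic.items():
--         path = []
--         while v in ldic and v not in memo: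
--             path.append(v)
--             v = ldic[v]
--         v = memo.get(v, v)
--         for p in path:
--             memo[p] = v
--         out[k] = v
--     return out
-- ===== Notes on version B (the rewrite author's own statement) =====
-- stated objective: alternative
-- what changed: A repeatedly sweeps the whole dict (pointer-jumping every chain link) and recurses until a sweep changes nothing; B makes one pass, resolving each value's chain by direct path-following with a memo dict that caches every visited key's final endpoint.
import Mathlib
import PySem

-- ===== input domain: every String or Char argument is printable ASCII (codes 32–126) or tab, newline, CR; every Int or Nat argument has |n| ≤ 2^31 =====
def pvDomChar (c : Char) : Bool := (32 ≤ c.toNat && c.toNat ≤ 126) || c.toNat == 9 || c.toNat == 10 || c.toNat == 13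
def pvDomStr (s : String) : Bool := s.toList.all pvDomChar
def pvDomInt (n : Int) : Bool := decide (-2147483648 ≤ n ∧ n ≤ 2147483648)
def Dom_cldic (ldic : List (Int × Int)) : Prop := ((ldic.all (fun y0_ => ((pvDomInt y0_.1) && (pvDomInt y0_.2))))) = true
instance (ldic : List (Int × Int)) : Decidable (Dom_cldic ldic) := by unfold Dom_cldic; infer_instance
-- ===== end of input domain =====

-- B resolves each chain once with a memo cache instead of A's repeated pointer-jumping
-- sweeps. Return-value equivalence only: Python A mutates its dict argument in place,
-- Python B builds and returns a fresh dict.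

-- ===== PORT A =====
-- one 'for l in ldic' sweep: the keys never change, so iterating the live dict equals
-- iterating its (fixed) key list; 'ldic[l]' is exact as getD because l is always a key.
def cldicPass (d : PySem.Dict Int Int) : PySem.Dict Int Int × Bool :=
  d.keys.foldl (fun st l =>
    let v := st.1.getD l 0
    if st.1.contains v then (st.1.insert l (st.1.getD v 0), true) else st) (d, false)

-- A's self-recursion 'if c: ldic = cldic(ldic)'; the fuel is only a totality guard:
-- under Pre_cldic it is proved never to run out (lemma go_spec below).
def cldicGo : Nat → PySem.Dict Int Int → PySem.Dict Int Int
  | 0, d => d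
  | f + 1, d =>
    let (d', c) := cldicPass d
    if c then cldicGo f d' else d'

def cldic (ldic : List (Int × Int)) : List (Int × Int) :=
  (cldicGo (ldic.length * ldic.length + 1) (PySem.Dict.mk ldic)).items

-- ===== PORT B =====
-- the 'while v in ldic and v not in memo' loop of Source B; fuel n+1 suffices because
-- chains escape the (acyclic) key set within n steps.
def followB (d memo : PySem.Dict Int Int) : Nat → Int → List Int → List Int × Int
  | 0, v, path => (path, v)
  | f + 1, v, path =>
    if d.contains v && !(memo.contains v) then
      followB d memo f (d.getD v 0) (path ++ [v])
    else (path, v)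

def cldic_alt (ldic : List (Int × Int)) : List (Int × Int) :=
  let d := PySem.Dict.mk ldic
  (ldic.foldl (fun (st : PySem.Dict Int Int × PySem.Dict Int Int) kv =>
      let pw := followB d st.2 (ldic.length + 1) kv.2 []
      let r := st.2.getD pw.2 pw.2
      (st.1.insert kv.1 r, pw.1.foldl (fun m p => m.insert p r) st.2))
    (PySem.Dict.empty, PySem.Dict.empty)).1.items

-- ===== PRECONDITION & SPEC =====
-- one chain-lookup step of the dict: v ↦ d[v] on keys, identity elsewhere
def gstep (d : PySem.Dict Int Int) (v : Int) : Int := d.getD v v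

-- Pre_ excludes (a) duplicate keys — the argument is a Python dict, whose item list
-- cannot repeat a key — and (b) cyclic chains (a key whose lookup chain never leaves
-- the key set), on which Python A never returns (unbounded recursion, RecursionError).
def Pre_cldic (ldic : List (Int × Int)) : Prop :=
  (ldic.map Prod.fst).Nodup ∧
  ∀ k ∈ ldic.map Prod.fst, (gstep (PySem.Dict.mk ldic))^[ldic.length] k ∉ ldic.map Prod.fst

instance (ldic : List (Int × Int)) : Decidable (Pre_cldic ldic) := by
  unfold Pre_cldic; infer_instance

def pvWitness_cldic : (List (Int × Int)) := [(1, 2), (2, 3), (3, 7), (9, 9000)]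

def Spec_cldic (ldic : List (Int × Int)) (out : List (Int × Int)) : Prop := out = cldic_alt ldic
instance (ldic : List (Int × Int)) (out : List (Int × Int)) : Decidable (Spec_cldic ldic out) := by
  unfold Spec_cldic; infer_instance

-- ===== CLAIM (what is proved, stated in full; the proofs are below) =====
def Claim_equal_cldic : Prop :=
  ∀ (ldic : List (Int × Int)), Dom_cldic ldic → Pre_cldic ldic → Spec_cldic ldic (cldic ldic)

-- ===== LEMMAS AND PROOFS =====

-- chain endpoint: iterate the lookup step size-many times (enough on acyclic dicts)
def rho (d : PySem.Dict Int Int) (v : Int) : Int := (gstep d)^[d.size] v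

-- acyclicity (as used by the proofs): every chain escapes the key set within size steps
def Acyc (d : PySem.Dict Int Int) : Prop := ∀ v, (gstep d)^[d.size] v ∉ d.keys

-- escape time of a chain, computed with fuel
def escFuel (d : PySem.Dict Int Int) : Nat → Int → Nat
  | 0, _ => 0
  | f + 1, v => if d.contains v then escFuel d f (gstep d v) + 1 else 0

def esc (d : PySem.Dict Int Int) (v : Int) : Nat := escFuel d (d.size + 1) v

-- termination measure for A's recursion: total escape time of all stored values
def mdict (d : PySem.Dict Int Int) : Nat := (d.items.map (fun p => esc d p.2)).sum

-- the common specification: every value replaced by its chain endpoint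
def Rfun (d : PySem.Dict Int Int) : List (Int × Int) := d.items.map (fun p => (p.1, rho d p.2))

lemma contains_false_of_not_mem (d : PySem.Dict Int Int) (v : Int) (h : v ∉ d.keys) :
    d.contains v = false := by
  simpa [PySem.Dict.contains_eq_decide_mem_keys] using h

lemma contains_true_of_mem (d : PySem.Dict Int Int) (v : Int) (h : v ∈ d.keys) :
    d.contains v = true := by
  simpa [PySem.Dict.contains_eq_decide_mem_keys] using h

lemma gstep_of_not_mem (d : PySem.Dict Int Int) (v : Int) (h : v ∉ d.keys) : gstep d v = v :=
  PySem.Dict.getD_of_not_contains d v (contains_false_of_not_mem d v h)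

lemma iterate_gstep_of_not_mem (d : PySem.Dict Int Int) (v : Int) (m : Nat) (h : v ∉ d.keys) :
    (gstep d)^[m] v = v := by
  induction m with
  | zero => rfl
  | succ m ih => rw [Function.iterate_succ_apply, gstep_of_not_mem d v h, ih]

lemma rho_gstep (d : PySem.Dict Int Int) (h : Acyc d) (v : Int) :
    rho d (gstep d v) = rho d v := by
  have h1 : rho d (gstep d v) = (gstep d)^[d.size + 1] v :=
    (Function.iterate_succ_apply (gstep d) d.size v).symm
  rw [h1, Function.iterate_succ_apply', gstep_of_not_mem d _ (h v)]; rfl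

lemma rho_of_not_mem (d : PySem.Dict Int Int) (v : Int) (h : v ∉ d.keys) : rho d v = v :=
  iterate_gstep_of_not_mem d v d.size h

lemma rho_not_mem (d : PySem.Dict Int Int) (h : Acyc d) (v : Int) : rho d v ∉ d.keys := h v

lemma escFuel_of_not_mem (d : PySem.Dict Int Int) (f : Nat) (v : Int) (h : v ∉ d.keys) :
    escFuel d f v = 0 := by
  cases f with
  | zero => rfl
  | succ f => simp [escFuel, contains_false_of_not_mem d v h]

lemma escFuel_stable (d : PySem.Dict Int Int) :
    ∀ (f F : Nat) (v : Int), (gstep d)^[f] v ∉ d.keys → f ≤ F → escFuel d F v = escFuel d f v := by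
  intro f
  induction f with
  | zero =>
    intro F v h _
    rw [escFuel_of_not_mem d F v h, escFuel_of_not_mem d 0 v h]
  | succ f ih =>
    intro F v h hF
    cases F with
    | zero => omega
    | succ F =>
      by_cases hv : v ∈ d.keys
      · simp only [escFuel, contains_true_of_mem d v hv, if_pos]
        rw [ih F (gstep d v) (by rwa [← Function.iterate_succ_apply]) (by omega)]
      · rw [escFuel_of_not_mem d _ v hv, escFuel_of_not_mem d _ v hv]

lemma esc_of_not_mem (d : PySem.Dict Int Int) (v : Int) (h : v ∉ d.keys) : esc d v = 0 :=
  escFuel_of_not_mem d _ v h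

lemma esc_succ (d : PySem.Dict Int Int) (hA : Acyc d) (v : Int) (h : v ∈ d.keys) :
    esc d v = esc d (gstep d v) + 1 := by
  have h1 : esc d v = escFuel d d.size (gstep d v) + 1 := by
    simp [esc, escFuel, contains_true_of_mem d v h]
  have h2 : escFuel d (d.size + 1) (gstep d v) = escFuel d d.size (gstep d v) := by
    apply escFuel_stable d d.size (d.size + 1) (gstep d v) _ (by omega)
    have : (gstep d)^[d.size] (gstep d v) = (gstep d)^[d.size] v := by
      rw [← Function.iterate_succ_apply, Function.iterate_succ_apply',
        gstep_of_not_mem d _ (hA v)]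
    rw [this]; exact hA v
  rw [h1, esc, h2]

lemma esc_le (d : PySem.Dict Int Int) (hA : Acyc d) :
    ∀ (m : Nat) (v : Int), (gstep d)^[m] v ∉ d.keys → esc d v ≤ m := by
  intro m
  induction m with
  | zero => intro v h; rw [esc_of_not_mem d v (by simpa using h)]
  | succ m ih =>
    intro v h
    by_cases hv : v ∈ d.keys
    · rw [esc_succ d hA v hv]
      have := ih (gstep d v) (by rwa [← Function.iterate_succ_apply])
      omega
    · rw [esc_of_not_mem d v hv]; omega

lemma esc_le_size (d : PySem.Dict Int Int) (hA : Acyc d) (v : Int) : esc d v ≤ d.size :=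
  esc_le d hA d.size v (hA v)

lemma gstep_insert (d : PySem.Dict Int Int) (k w v : Int) :
    gstep (d.insert k w) v = if v = k then w else gstep d v := by
  simp only [gstep]
  rw [PySem.Dict.getD_insert d k v w v]

lemma keys_insert_mem (d : PySem.Dict Int Int) (k w : Int) (h : k ∈ d.keys) :
    (d.insert k w).keys = d.keys :=
  PySem.Dict.keys_insert_of_contains d w (contains_true_of_mem d k h)

lemma size_insert_mem (d : PySem.Dict Int Int) (k w : Int) (h : k ∈ d.keys) :
    (d.insert k w).size = d.size := by
  have h1 : (d.insert k w).keys.length = d.keys.length := by rw [keys_insert_mem d k w h]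
  simpa [PySem.Dict.keys] using h1

lemma iterate_insert_eq_rho (d : PySem.Dict Int Int) (l : Int) (hA : Acyc d)
    (hl : l ∈ d.keys) (hv : gstep d l ∈ d.keys) :
    ∀ (N : Nat) (v : Int) (m : Nat), esc d v ≤ N → esc d v ≤ m →
      (gstep (d.insert l (gstep d (gstep d l))))^[m] v = rho d v := by
  set e := d.insert l (gstep d (gstep d l)) with he
  have hkeys : e.keys = d.keys := keys_insert_mem d l _ hl
  intro N
  induction N with
  | zero =>
    intro v m h0 hm
    by_cases hvk : v ∈ d.keys
    · exfalso; rw [esc_succ d hA v hvk] at h0; omega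
    · rw [iterate_gstep_of_not_mem e v m (by rwa [hkeys]), rho_of_not_mem d v hvk]
  | succ N ih =>
    intro v m hN hm
    by_cases hvk : v ∈ d.keys
    · have hesc : esc d v = esc d (gstep d v) + 1 := esc_succ d hA v hvk
      by_cases hvl : v = l
      · subst hvl
        have hesc2 : esc d (gstep d v) = esc d (gstep d (gstep d v)) + 1 :=
          esc_succ d hA _ hv
        obtain ⟨m', rfl⟩ : ∃ m', m = m' + 1 := ⟨m - 1, by omega⟩
        rw [Function.iterate_succ_apply]
        have hstep : gstep e v = gstep d (gstep d v) := by
          rw [gstep_insert, if_pos rfl]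
        rw [hstep, ih (gstep d (gstep d v)) m' (by omega) (by omega),
          rho_gstep d hA, rho_gstep d hA]
      · obtain ⟨m', rfl⟩ : ∃ m', m = m' + 1 := ⟨m - 1, by omega⟩
        rw [Function.iterate_succ_apply]
        have hstep : gstep e v = gstep d v := by
          rw [gstep_insert, if_neg hvl]
        rw [hstep, ih (gstep d v) m' (by omega) (by omega), rho_gstep d hA]
    · rw [iterate_gstep_of_not_mem e v m (by rwa [hkeys]), rho_of_not_mem d v hvk]

lemma acyc_insert (d : PySem.Dict Int Int) (l : Int) (hA : Acyc d)
    (hl : l ∈ d.keys) (hv : gstep d l ∈ d.keys) :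
    Acyc (d.insert l (gstep d (gstep d l))) := by
  intro v
  rw [size_insert_mem d l _ hl, keys_insert_mem d l _ hl,
    iterate_insert_eq_rho d l hA hl hv (esc d v) v d.size le_rfl (esc_le_size d hA v)]
  exact rho_not_mem d hA v

lemma rho_insert (d : PySem.Dict Int Int) (l : Int) (hA : Acyc d)
    (hl : l ∈ d.keys) (hv : gstep d l ∈ d.keys) (v : Int) :
    rho (d.insert l (gstep d (gstep d l))) v = rho d v := by
  rw [rho, size_insert_mem d l _ hl,
    iterate_insert_eq_rho d l hA hl hv (esc d v) v d.size le_rfl (esc_le_size d hA v)]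

lemma esc_insert_le (d : PySem.Dict Int Int) (l : Int) (hA : Acyc d)
    (hl : l ∈ d.keys) (hv : gstep d l ∈ d.keys) (v : Int) :
    esc (d.insert l (gstep d (gstep d l))) v ≤ esc d v := by
  apply esc_le _ (acyc_insert d l hA hl hv)
  rw [iterate_insert_eq_rho d l hA hl hv (esc d v) v (esc d v) le_rfl le_rfl,
    keys_insert_mem d l _ hl]
  exact rho_not_mem d hA v

lemma esc_insert_lt (d : PySem.Dict Int Int) (l : Int) (hA : Acyc d)
    (hl : l ∈ d.keys) (hv : gstep d l ∈ d.keys) :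
    esc (d.insert l (gstep d (gstep d l))) (gstep d (gstep d l)) < esc d (gstep d l) := by
  have h1 := esc_insert_le d l hA hl hv (gstep d (gstep d l))
  have h2 : esc d (gstep d l) = esc d (gstep d (gstep d l)) + 1 := esc_succ d hA _ hv
  omega

lemma mdict_insert_lt (d : PySem.Dict Int Int) (l : Int) (hA : Acyc d) (hnd : d.keys.Nodup)
    (hl : l ∈ d.keys) (hv : gstep d l ∈ d.keys) :
    mdict (d.insert l (gstep d (gstep d l))) < mdict d := by
  set w := gstep d (gstep d l) with hw
  set e := d.insert l w with he
  have hitems : e.items = d.items.map (fun p => if p.1 == l then (l, w) else p) :=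
    PySem.Dict.items_insert_of_contains d w (contains_true_of_mem d l hl)
  have hval : ∀ p ∈ d.items, p.1 = l → p.2 = gstep d l := by
    intro p hp hpl
    have h2 : d.getD l l = p.2 := by
      have h3 : (l, p.2) ∈ d.items := by rw [← hpl]; simpa using hp
      exact PySem.Dict.getD_of_mem_items d h3 hnd l
    exact h2.symm
  have hmap : mdict e =
      (d.items.map (fun p => esc e (if p.1 == l then (l, w) else p).2)).sum := by
    rw [mdict, hitems, List.map_map]; rfl
  rw [hmap, mdict]
  apply List.sum_lt_sum
  · intro p hp
    by_cases hpl : p.1 = l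
    · simp only [hpl, beq_self_eq_true, if_pos]
      have := esc_insert_lt d l hA hl hv
      rw [hval p hp hpl]
      simp only [← he, ← hw] at this ⊢
      omega
    · simp only [beq_iff_eq, hpl, if_neg, not_false_iff]
      exact esc_insert_le d l hA hl hv p.2
  · obtain ⟨p, hp, hpl⟩ : ∃ p ∈ d.items, p.1 = l := by
      have : l ∈ d.items.map Prod.fst := hl
      simpa using this
    refine ⟨p, hp, ?_⟩
    simp only [hpl, beq_self_eq_true, if_pos]
    have := esc_insert_lt d l hA hl hv
    rw [hval p hp hpl]
    simp only [← he, ← hw] at this ⊢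
    omega

-- ===== A's sweep =====

-- value lookup in the sweep: for a key, ldic[l] is the gstep of the current dict
lemma getD_eq_gstep (e : PySem.Dict Int Int) (l : Int) (h : l ∈ e.keys) :
    e.getD l 0 = gstep e l := by
  rw [PySem.Dict.getD_eq_get?_getD, gstep, PySem.Dict.getD_eq_get?_getD]
  cases hg : e.get? l with
  | some x => rfl
  | none =>
    exfalso
    have := PySem.Dict.contains_eq_isSome_get? e l
    rw [contains_true_of_mem e l h, hg] at this
    simp at this

def RfunD (d e : PySem.Dict Int Int) : List (Int × Int) := e.items.map (fun p => (p.1, rho d p.2))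

lemma pass_fold_inv (d : PySem.Dict Int Int) (hnd : d.keys.Nodup) :
    ∀ (ks : List Int) (e : PySem.Dict Int Int) (c : Bool),
      (∀ l ∈ ks, l ∈ d.keys) → e.keys = d.keys → Acyc e → (∀ v, rho e v = rho d v) →
      RfunD d e = Rfun d →
      (ks.foldl (fun st l =>
          let v := st.1.getD l 0
          if st.1.contains v then (st.1.insert l (st.1.getD v 0), true) else st) (e, c)).1.keys
        = d.keys ∧
      Acyc (ks.foldl (fun st l =>
          let v := st.1.getD l 0
          if st.1.contains v then (st.1.insert l (st.1.getD v 0), true) else st) (e, c)).1 ∧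
      (∀ v, rho (ks.foldl (fun st l =>
          let v := st.1.getD l 0
          if st.1.contains v then (st.1.insert l (st.1.getD v 0), true) else st) (e, c)).1 v
        = rho d v) ∧
      RfunD d (ks.foldl (fun st l =>
          let v := st.1.getD l 0
          if st.1.contains v then (st.1.insert l (st.1.getD v 0), true) else st) (e, c)).1
        = Rfun d ∧
      ((ks.foldl (fun st l =>
          let v := st.1.getD l 0
          if st.1.contains v then (st.1.insert l (st.1.getD v 0), true) else st) (e, c)).2 = false →
        (ks.foldl (fun st l =>
          let v := st.1.getD l 0
          if st.1.contains v then (st.1.insert l (st.1.getD v 0), true) else st) (e, c)).1 = e ∧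
        c = false ∧ ∀ l ∈ ks, e.contains (e.getD l 0) = false) ∧
      ((ks.foldl (fun st l =>
          let v := st.1.getD l 0
          if st.1.contains v then (st.1.insert l (st.1.getD v 0), true) else st) (e, c)).2 = true →
        mdict (ks.foldl (fun st l =>
          let v := st.1.getD l 0
          if st.1.contains v then (st.1.insert l (st.1.getD v 0), true) else st) (e, c)).1 < mdict e ∨
        ((ks.foldl (fun st l =>
          let v := st.1.getD l 0
          if st.1.contains v then (st.1.insert l (st.1.getD v 0), true) else st) (e, c)).1 = e ∧
          c = true)) := by
  intro ks
  induction ks with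
  | nil =>
    intro e c hsub he hAe hrho hR
    simp only [List.foldl_nil]
    refine ⟨he, hAe, hrho, hR, ?_, ?_⟩
    · intro hc
      exact ⟨by trivial, hc, by intro l hl; simp at hl⟩
    · intro hc
      exact Or.inr ⟨by trivial, hc⟩
  | cons l ks ih =>
    intro e c hsub he hAe hrho hR
    have hnde : e.keys.Nodup := he ▸ hnd
    have hld : l ∈ d.keys := hsub l (by simp)
    have hle : l ∈ e.keys := he ▸ hld
    simp only [List.foldl_cons]
    by_cases hc : e.contains (e.getD l 0) = true
    · rw [if_pos hc]
      have hge : e.getD l 0 = gstep e l := getD_eq_gstep e l hle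
      have hve : gstep e l ∈ e.keys := by
        rw [hge] at hc
        simpa [PySem.Dict.contains_eq_decide_mem_keys] using hc
      have hge2 : e.getD (e.getD l 0) 0 = gstep e (gstep e l) := by
        rw [hge]; exact getD_eq_gstep e _ hve
      rw [hge2]
      have hk1 : (e.insert l (gstep e (gstep e l))).keys = e.keys := keys_insert_mem e l _ hle
      have hA1 : Acyc (e.insert l (gstep e (gstep e l))) := acyc_insert e l hAe hle hve
      have hrho1 : ∀ v, rho (e.insert l (gstep e (gstep e l))) v = rho d v := fun v =>
        (rho_insert e l hAe hle hve v).trans (hrho v)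
      have hR1 : RfunD d (e.insert l (gstep e (gstep e l))) = Rfun d := by
        rw [← hR, RfunD, RfunD,
          PySem.Dict.items_insert_of_contains e (gstep e (gstep e l))
            (contains_true_of_mem e l hle),
          List.map_map]
        apply List.map_congr_left
        intro p hp
        by_cases hpl : p.1 = l
        · have hval : p.2 = gstep e l := by
            have h3 : (l, p.2) ∈ e.items := by rw [← hpl]; simpa using hp
            exact (PySem.Dict.getD_of_mem_items e h3 hnde l).symm
          simp only [Function.comp, hpl, beq_self_eq_true, if_pos]
          refine Prod.ext (by simp) ?_
          show rho d (gstep e (gstep e l)) = rho d p.2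
          rw [← hrho, rho_gstep e hAe, hval, hrho]
        · simp only [Function.comp, beq_iff_eq, hpl, if_neg, not_false_iff]
      have hm1 : mdict (e.insert l (gstep e (gstep e l))) < mdict e :=
        mdict_insert_lt e l hAe hnde hle hve
      obtain ⟨i1, i2, i3, i4, i5, i6⟩ := ih (e.insert l (gstep e (gstep e l))) true
        (fun x hx => hsub x (by simp [hx])) (hk1.trans he) hA1 hrho1 hR1
      refine ⟨i1, i2, i3, i4, ?_, ?_⟩
      · intro hcf
        obtain ⟨_, htf, _⟩ := i5 hcf
        cases htf
      · intro hct
        rcases i6 hct with hlt | ⟨heq, _⟩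
        · exact Or.inl (lt_trans hlt hm1)
        · rw [heq]; exact Or.inl hm1
    · rw [if_neg hc]
      obtain ⟨i1, i2, i3, i4, i5, i6⟩ := ih e c
        (fun x hx => hsub x (by simp [hx])) he hAe hrho hR
      refine ⟨i1, i2, i3, i4, ?_, i6⟩
      intro hcf
      obtain ⟨r1, r2, r3⟩ := i5 hcf
      refine ⟨r1, r2, ?_⟩
      intro x hx
      rcases List.mem_cons.mp hx with rfl | hxk
      · simpa using hc
      · exact r3 x hxk

lemma cldicPass_spec (d : PySem.Dict Int Int) (hnd : d.keys.Nodup) (hA : Acyc d) :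
    (cldicPass d).1.keys = d.keys ∧ Acyc (cldicPass d).1 ∧
    (∀ v, rho (cldicPass d).1 v = rho d v) ∧ RfunD d (cldicPass d).1 = Rfun d ∧
    ((cldicPass d).2 = false → (cldicPass d).1 = d ∧
      ∀ l ∈ d.keys, d.contains (d.getD l 0) = false) ∧
    ((cldicPass d).2 = true → mdict (cldicPass d).1 < mdict d) := by
  have h := pass_fold_inv d hnd d.keys d false (fun l hl => hl) rfl hA (fun _ => rfl) rfl
  obtain ⟨h1, h2, h3, h4, h5, h6⟩ := h
  refine ⟨h1, h2, h3, h4, fun hc => ?_, fun hc => ?_⟩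
  · obtain ⟨he, _, hall⟩ := h5 hc
    exact ⟨he, hall⟩
  · rcases h6 hc with h | ⟨_, hfalse⟩
    · exact h
    · cases hfalse

lemma go_spec : ∀ (fuel : Nat) (d : PySem.Dict Int Int), mdict d < fuel →
    d.keys.Nodup → Acyc d → (cldicGo fuel d).items = Rfun d := by
  intro fuel
  induction fuel with
  | zero => intro d h; omega
  | succ fuel ih =>
    intro d hfuel hnd hA
    obtain ⟨h1, h2, h3, h4, h5, h6⟩ := cldicPass_spec d hnd hA
    show (if (cldicPass d).2 then cldicGo fuel (cldicPass d).1 else (cldicPass d).1).items = Rfun d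
    rcases Bool.eq_false_or_eq_true (cldicPass d).2 with hc | hc
    case inl =>
      rw [hc, if_pos rfl]
      rw [ih (cldicPass d).1 (by have := h6 hc; omega)
        (by rw [h1]; exact hnd) h2]
      rw [Rfun, RfunD] at *
      calc (cldicPass d).1.items.map (fun p => (p.1, rho (cldicPass d).1 p.2))
          = (cldicPass d).1.items.map (fun p => (p.1, rho d p.2)) := by
            apply List.map_congr_left; intro p _; rw [h3]
        _ = d.items.map (fun p => (p.1, rho d p.2)) := h4
    case inr =>
      obtain ⟨he, hall⟩ := h5 hc
      rw [hc, if_neg (by simp : ¬(false = true))]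
      rw [he, Rfun]
      have : ∀ p ∈ d.items, (p.1, rho d p.2) = p := by
        intro p hp
        have hk : p.1 ∈ d.keys := by
          simp only [PySem.Dict.keys]; exact List.mem_map_of_mem hp
        have hval : d.getD p.1 0 = p.2 := by
          obtain ⟨a, b⟩ := p
          exact PySem.Dict.getD_of_mem_items d (by simpa using hp) hnd 0
        have := hall p.1 hk
        rw [hval] at this
        have hnm : p.2 ∉ d.keys := by
          intro hm; rw [contains_true_of_mem d p.2 hm] at this; cases this
        rw [rho_of_not_mem d p.2 hnm]
      rw [List.map_congr_left this, List.map_id']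

lemma mdict_le_sq (d : PySem.Dict Int Int) (hA : Acyc d) : mdict d ≤ d.size * d.size := by
  have h := List.sum_le_card_nsmul (d.items.map (fun p => esc d p.2)) d.size ?_
  · simpa [mdict, PySem.Dict.size] using h
  · intro x hx
    simp only [List.mem_map] at hx
    obtain ⟨p, _, rfl⟩ := hx
    exact esc_le_size d hA p.2

-- ===== B's memoized resolution =====

def Imemo (d memo : PySem.Dict Int Int) : Prop :=
  ∀ p x, memo.get? p = some x → p ∈ d.keys ∧ x = rho d p

lemma followB_spec (d memo : PySem.Dict Int Int) (hI : Imemo d memo) (hA : Acyc d) :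
    ∀ (f : Nat) (v : Int) (path : List Int), (gstep d)^[f] v ∉ d.keys →
      memo.getD (followB d memo f v path).2 (followB d memo f v path).2 = rho d v ∧
      ∀ p ∈ (followB d memo f v path).1,
        p ∈ path ∨ (p ∈ d.keys ∧ rho d p = rho d v) := by
  intro f
  induction f with
  | zero =>
    intro v path h
    simp only [Function.iterate_zero, id] at h
    have hm : memo.get? v = none := by
      cases hm : memo.get? v with
      | none => rfl
      | some x => exact absurd (hI v x hm).1 h
    constructor
    · show memo.getD v v = rho d v
      rw [PySem.Dict.getD_eq_get?_getD, hm, rho_of_not_mem d v h]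
      rfl
    · intro p hp
      exact Or.inl hp
  | succ f ih =>
    intro v path h
    by_cases hb : (d.contains v && !(memo.contains v)) = true
    · have hv : v ∈ d.keys := by
        simp only [Bool.and_eq_true] at hb
        simpa [PySem.Dict.contains_eq_decide_mem_keys] using hb.1
      have hg : d.getD v 0 = gstep d v := getD_eq_gstep d v hv
      have hrec : followB d memo (f + 1) v path
          = followB d memo f (gstep d v) (path ++ [v]) := by
        simp only [followB, hb, if_pos, hg]
      obtain ⟨ih1, ih2⟩ := ih (gstep d v) (path ++ [v])
        (by rwa [← Function.iterate_succ_apply])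
      rw [hrec]
      constructor
      · rw [ih1, rho_gstep d hA]
      · intro p hp
        rcases ih2 p hp with hmem | ⟨hk, hr⟩
        · rcases List.mem_append.mp hmem with h1 | h1
          · exact Or.inl h1
          · have hpv : p = v := by simpa using h1
            subst hpv
            exact Or.inr ⟨hv, rfl⟩
        · exact Or.inr ⟨hk, by rw [hr, rho_gstep d hA]⟩
    · have hrec : followB d memo (f + 1) v path = (path, v) := by
        simp only [followB, Bool.not_eq_true] at hb ⊢
        rw [hb]
        rfl
      rw [hrec]
      refine ⟨?_, fun p hp => Or.inl hp⟩
      show memo.getD v v = rho d v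
      cases hm : memo.get? v with
      | some x =>
        rw [PySem.Dict.getD_eq_get?_getD, hm, (hI v x hm).2]
        rfl
      | none =>
        have hmc : memo.contains v = false := by
          rw [PySem.Dict.contains_eq_isSome_get?, hm]; rfl
        have hdc : d.contains v = false := by
          simp only [hmc, Bool.not_false, Bool.and_true] at hb
          simpa using hb
        have hnk : v ∉ d.keys := by
          simpa [PySem.Dict.contains_eq_decide_mem_keys] using hdc
        rw [PySem.Dict.getD_eq_get?_getD, hm, rho_of_not_mem d v hnk]
        rfl

lemma imemo_foldl_insert (d : PySem.Dict Int Int) (r : Int) :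
    ∀ (q : List Int) (memo : PySem.Dict Int Int), Imemo d memo →
      (∀ p ∈ q, p ∈ d.keys ∧ rho d p = r) →
      Imemo d (q.foldl (fun m p => m.insert p r) memo) := by
  intro q
  induction q with
  | nil => intro memo hI _; exact hI
  | cons p0 q ih =>
    intro memo hI hq
    simp only [List.foldl_cons]
    apply ih
    · intro p x hget
      rw [PySem.Dict.get?_insert memo p0 p r] at hget
      split at hget
      · rename_i hpe
        obtain ⟨h1, h2⟩ := hq p0 (by simp)
        cases hget
        exact ⟨hpe ▸ h1, by rw [hpe, h2]⟩
      · exact hI p x hget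
    · intro p hp; exact hq p (by simp [hp])

lemma alt_fold_spec (d : PySem.Dict Int Int) (F : Nat) (hA : Acyc d)
    (hF : ∀ v : Int, (gstep d)^[F] v ∉ d.keys) :
    ∀ (rest : List (Int × Int)) (out memo : PySem.Dict Int Int), Imemo d memo →
      (∀ kv ∈ rest, out.contains kv.1 = false) → (rest.map Prod.fst).Nodup →
      ((rest.foldl (fun (st : PySem.Dict Int Int × PySem.Dict Int Int) kv =>
          let pw := followB d st.2 F kv.2 []
          let r := st.2.getD pw.2 pw.2
          (st.1.insert kv.1 r, pw.1.foldl (fun m p => m.insert p r) st.2)) (out, memo)).1).items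
        = out.items ++ rest.map (fun kv => (kv.1, rho d kv.2)) := by
  intro rest
  induction rest with
  | nil => intro out memo _ _ _; simp
  | cons kv rest ih =>
    intro out memo hI hout hnd
    simp only [List.foldl_cons]
    obtain ⟨hgd, hpath⟩ := followB_spec d memo hI hA F kv.2 [] (hF kv.2)
    have hr : memo.getD (followB d memo F kv.2 []).2 (followB d memo F kv.2 []).2
        = rho d kv.2 := hgd
    rw [ih _ _ ?_ ?_ (by simpa using hnd.of_cons)]
    · rw [PySem.Dict.items_insert_of_not_contains out _ (hout kv (by simp)), hr]
      simp
    · apply imemo_foldl_insert d _ _ _ hI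
      intro p hp
      rcases hpath p hp with h | h
      · cases h
      · rw [hr]; exact h
    · intro kv' hkv'
      rw [PySem.Dict.contains_insert out kv.1 kv'.1 _]
      have h1 : out.contains kv'.1 = false := hout kv' (by simp [hkv'])
      have h2 : (kv'.1 == kv.1) = false := by
        simp only [List.map_cons, List.nodup_cons] at hnd
        have : kv'.1 ∈ rest.map Prod.fst := List.mem_map_of_mem hkv'
        simp only [beq_eq_false_iff_ne, ne_eq]
        intro he; exact hnd.1 (he ▸ this)
      rw [h1, h2]
      rfl

-- ===== putting the two sides together =====

lemma pre_nodup (ldic : List (Int × Int)) (h : Pre_cldic ldic) :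
    (PySem.Dict.mk ldic).keys.Nodup := h.1

lemma pre_acyc (ldic : List (Int × Int)) (h : Pre_cldic ldic) : Acyc (PySem.Dict.mk ldic) := by
  intro v
  by_cases hv : v ∈ (PySem.Dict.mk ldic).keys
  · exact h.2 v hv
  · rw [iterate_gstep_of_not_mem _ v _ hv]; exact hv

lemma cldic_eq_Rfun (ldic : List (Int × Int)) (h : Pre_cldic ldic) :
    cldic ldic = Rfun (PySem.Dict.mk ldic) := by
  have hA := pre_acyc ldic h
  apply go_spec
  · have h1 := mdict_le_sq (PySem.Dict.mk ldic) hA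
    have hsz : (PySem.Dict.mk ldic).size = ldic.length := rfl
    rw [hsz] at h1
    omega
  · exact pre_nodup ldic h
  · exact hA

lemma cldic_alt_eq_Rfun (ldic : List (Int × Int)) (h : Pre_cldic ldic) :
    cldic_alt ldic = Rfun (PySem.Dict.mk ldic) := by
  have hA := pre_acyc ldic h
  have hF : ∀ v : Int, (gstep (PySem.Dict.mk ldic))^[ldic.length + 1] v
      ∉ (PySem.Dict.mk ldic).keys := by
    intro v
    rw [Function.iterate_succ_apply']
    have h0 : (gstep (PySem.Dict.mk ldic))^[ldic.length] v = rho (PySem.Dict.mk ldic) v := rfl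
    rw [h0, gstep_of_not_mem _ _ (rho_not_mem _ hA v)]
    exact rho_not_mem _ hA v
  have := alt_fold_spec (PySem.Dict.mk ldic) (ldic.length + 1) hA hF ldic
    PySem.Dict.empty PySem.Dict.empty ?_ ?_ h.1
  · simpa [cldic_alt, Rfun] using this
  · intro p x hget
    rw [PySem.Dict.get?_empty p] at hget; cases hget
  · intro kv _
    exact PySem.Dict.contains_empty kv.1

-- ===== VERDICT (by name: the statement is the Claim_ definition above) =====
theorem cldic_spec : Claim_equal_cldic := by
  intro ldic _ hpre
  show cldic ldic = cldic_alt ldic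
  rw [cldic_eq_Rfun ldic hpre, cldic_alt_eq_Rfun ldic hpre]
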